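-- pv_equiv track=rewrite | github.com/dmcomm/dmcomm-project | dmscope/dmscope.py | processDigital
-- ===== SOURCE A (Python) =====
-- log_prefix_low   = 0b00000000
--
-- log_prefix_high  = 0b01000000
--
-- log_prefix_again = 0b10000000
--
-- log_prefix_mask  = 0b11000000
--
-- log_max_count    = 0b00111111
--
-- log_count_bits   = 6
--
-- log_prefix_tick_overrun = 0xF0
--
-- log_max_ticks_missed = 0x0F
--
-- def parseHexBuf(s):
--     parts = s[2:].split(" ")
--     return [int(part, 16) for part in parts]
--
-- def checkMissedTicks(item):
--     if item & log_prefix_tick_overrun == log_prefix_tick_overrun: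
--         ticksMissed = item & log_max_ticks_missed
--         if ticksMissed == 0:
--             return [(None, 8), (item, None), (None, 8)]
--         else:
--             return [(None, ticksMissed)]
--     else:
--         return [(item, None)]
--
-- def processDigital(d):
--     counts = []
--     prevCount = None
--     prevLevel = None
--     shift = 0
--     for item in parseHexBuf(d):
--         prefix = item & log_prefix_mask
--         isNewLow = prefix == log_prefix_low
--         isNewHigh = prefix == log_prefix_high
--         if isNewHigh or isNewLow:
--             if prevCount is not None:
--                 counts.append((prevLevel, prevCount))
--             prevCount = item & log_max_count
--             shift = 0
--             if isNewHigh: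
--                 prevLevel = 1
--             else:
--                 prevLevel = 0
--         elif prefix == log_prefix_again:
--             shift += log_count_bits
--             prevCount |= (item & log_max_count) << shift
--         else:
--             if prevLevel is not None:
--                 counts.append((prevLevel, prevCount))
--             prevCount = None
--             prevLevel = None
--             counts.extend(checkMissedTicks(item))
--     if prevLevel is not None:
--         counts.append((prevLevel, prevCount))
--     return counts
-- ===== SOURCE B (Python) =====
-- log_prefix_low   = 0b00000000
-- log_prefix_high  = 0b01000000
-- log_prefix_again = 0b10000000
-- log_prefix_mask  = 0b11000000
-- log_max_count    = 0b00111111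
-- log_count_bits   = 6
-- log_prefix_tick_overrun = 0xF0
-- log_max_ticks_missed = 0x0F
--
-- def _expandOther(item):
--     if item & log_prefix_tick_overrun == log_prefix_tick_overrun:
--         ticksMissed = item & log_max_ticks_missed
--         if ticksMissed == 0:
--             return [(None, 8), (item, None), (None, 8)]
--         return [(None, ticksMissed)]
--     return [(item, None)]
--
-- def processDigital(d):
--     # Pass 1: segment the byte stream into groups.
--     # A run group is [level, chunk0, chunk1, ...]; an 'other' byte stands alone.
--     groups = []
--     for part in d[2:].split(" "):
--         item = int(part, 16)
--         prefix = item & log_prefix_mask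
--         if prefix == log_prefix_low or prefix == log_prefix_high:
--             groups.append((0 if prefix == log_prefix_low else 1, [item & log_max_count]))
--         elif prefix == log_prefix_again:
--             groups[-1][1].append(item & log_max_count)
--         else:
--             groups.append((None, item))
--     # Pass 2: emit each group in order.
--     out = []
--     for level, payload in groups:
--         if level is None:
--             out.extend(_expandOther(payload))
--         else:
--             total = 0
--             shift = 0
--             for chunk in payload:
--                 total |= chunk << shift
--                 shift += log_count_bits
--             out.append((level, total))
--     return out
-- ===== Notes on version B (the rewrite author's own statement) =====
-- stated objective: alternative
-- what changed: Replaces A's single pass with scalar run state (prevLevel/prevCount/shift and deferred flushes) by a two-pass decomposition: pass 1 segments the byte stream into groups (a run opened by each low/high byte and extended by its continuation bytes, plus stand-alone tick/overrun bytes), pass 2 emits each group's (level, total) pair or its missed-tick expansion in order.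
import Mathlib
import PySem

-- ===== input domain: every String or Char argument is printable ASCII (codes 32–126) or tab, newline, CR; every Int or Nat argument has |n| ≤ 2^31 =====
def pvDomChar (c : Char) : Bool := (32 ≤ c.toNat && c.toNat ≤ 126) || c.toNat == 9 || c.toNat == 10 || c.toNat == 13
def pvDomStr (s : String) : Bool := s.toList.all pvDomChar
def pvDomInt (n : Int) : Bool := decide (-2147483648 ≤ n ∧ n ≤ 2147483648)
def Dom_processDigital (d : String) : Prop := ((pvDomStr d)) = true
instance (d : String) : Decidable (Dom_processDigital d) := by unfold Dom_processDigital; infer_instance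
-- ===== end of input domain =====

-- B replaces A's one-pass scalar-state scan by a two-pass decomposition (segment into
-- groups, then emit each group); same outputs, no speed claim (objective: alternative).

-- ===== PORT A =====
-- shared helper: parseHexBuf(d) = [int(p, 16) for p in d[2:].split(" ")], as Options
-- (none exactly where int(p, 16) raises ValueError; Pre_ excludes those inputs)
def hexItems (d : String) : List (Option Int) :=
  ((PySem.Str.split? (PySem.Str.slice d (some 2) none) " ").getD []).map
    (fun p => PySem.Int.ofStrBase? p 16)

-- the int list both Pythons iterate over; the .getD 0 is unreachable under Pre_
def parseHexBuf (d : String) : List Int := (hexItems d).map (fun o => o.getD 0)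

def checkMissedTicks (item : Int) : List (Option Int × Option Int) :=
  if PySem.Int.band item 240 = 240 then
    let ticksMissed := PySem.Int.band item 15
    if ticksMissed = 0 then [(none, some 8), (some item, none), (none, some 8)]
    else [(none, some ticksMissed)]
  else [(some item, none)]

-- A's loop body over state (counts, prevLevel, prevCount, shift); the `prevCount.getD 0`
-- in the 'again' (0x80) branch is Python's TypeError point, excluded by Pre_
def aStep (st : List (Option Int × Option Int) × Option Int × Option Int × Nat) (item : Int) :
    List (Option Int × Option Int) × Option Int × Option Int × Nat :=
  let (counts, prevLevel, prevCount, shift) := st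
  let pfx := PySem.Int.band item 192
  if pfx = 0 ∨ pfx = 64 then
    let counts := match prevCount with
      | some c => counts ++ [(prevLevel, some c)]
      | none => counts
    (counts, some (if pfx = 64 then (1 : Int) else 0), some (PySem.Int.band item 63), 0)
  else if pfx = 128 then
    let shift := shift + 6
    (counts, prevLevel, some (PySem.Int.bor (prevCount.getD 0) (PySem.Int.band item 63 <<< shift)), shift)
  else
    let counts := if prevLevel.isSome then counts ++ [(prevLevel, prevCount)] else counts
    (counts ++ checkMissedTicks item, none, none, shift)

def processDigital (d : String) : List (Option Int × Option Int) :=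
  let st := (parseHexBuf d).foldl aStep ([], none, none, 0)
  if st.2.1.isSome then st.1 ++ [(st.2.1, st.2.2.1)] else st.1

-- ===== PORT B =====
inductive PVGroup where
  | run : Int → List Int → PVGroup
  | other : Int → PVGroup
deriving DecidableEq

def expandOther (item : Int) : List (Option Int × Option Int) :=
  if PySem.Int.band item 240 = 240 then
    let ticksMissed := PySem.Int.band item 15
    if ticksMissed = 0 then [(none, some 8), (some item, none), (none, some 8)]
    else [(none, some ticksMissed)]
  else [(some item, none)]

-- pass 1 body; the group list is kept newest-first (Python appends / mutates groups[-1]);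
-- the fall-through on an orphan continuation byte is Python's IndexError point, outside Pre_
def bStep (gs : List PVGroup) (item : Int) : List PVGroup :=
  let pfx := PySem.Int.band item 192
  if pfx = 0 ∨ pfx = 64 then
    .run (if pfx = 0 then (0 : Int) else 1) [PySem.Int.band item 63] :: gs
  else if pfx = 128 then
    match gs with
    | .run l cs :: rest => .run l (cs ++ [PySem.Int.band item 63]) :: rest
    | gs => gs
  else
    .other item :: gs

-- pass 2: emit one group (the run total via the chunk/shift accumulation loop of Source B)
def emitGroup (g : PVGroup) : List (Option Int × Option Int) :=
  match g with
  | .run l payload =>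
      let ts := payload.foldl
        (fun (p : Int × Nat) (chunk : Int) => (PySem.Int.bor p.1 (chunk <<< p.2), p.2 + 6)) (0, 0)
      [(some l, some ts.1)]
  | .other item => expandOther item

def processDigital_alt (d : String) : List (Option Int × Option Int) :=
  (((parseHexBuf d).foldl bStep []).reverse).flatMap emitGroup

-- ===== PRECONDITION & SPEC =====
-- wellformedness scan for Pre_: every 'again' byte (pfx 0x80) must extend an open run,
-- i.e. follow a low/high byte with only prefix-0x80 bytes in between
def okItems : List Int → Bool → Bool
  | [], _ => true
  | x :: xs, opened =>
    let pfx := PySem.Int.band x 192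
    if pfx = 0 ∨ pfx = 64 then okItems xs true
    else if pfx = 128 then opened && okItems xs true
    else okItems xs false

-- Pre_ excludes exactly the inputs where the Python A raises: a part int(·, 16) rejects
-- (ValueError), or a continuation byte (prefix 0x80) with no open run (TypeError on prevCount |= …)
def Pre_processDigital (d : String) : Prop :=
  (hexItems d).all Option.isSome = true ∧ okItems (parseHexBuf d) false = true
instance (d : String) : Decidable (Pre_processDigital d) := by
  unfold Pre_processDigital; infer_instance

def pvWitness_processDigital : String := "L:00 80 81 f3 f0 40"

def Spec_processDigital (d : String) (out : List (Option Int × Option Int)) : Prop :=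
  out = processDigital_alt d
instance (d : String) (out : List (Option Int × Option Int)) : Decidable (Spec_processDigital d out) := by
  unfold Spec_processDigital; infer_instance

-- ===== CLAIM (what is proved, stated in full; the proofs are below) =====
def Claim_equal_processDigital : Prop :=
  ∀ (d : String), Dom_processDigital d → Pre_processDigital d →
    Spec_processDigital d (processDigital d)

-- ===== LEMMAS AND PROOFS =====

-- the run total of pass 2, and A's final flush / B's final emit
def foldVal (cs : List Int) : Int :=
  (cs.foldl (fun (p : Int × Nat) (chunk : Int) => (PySem.Int.bor p.1 (chunk <<< p.2), p.2 + 6)) (0, 0)).1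

def finishA (st : List (Option Int × Option Int) × Option Int × Option Int × Nat) :
    List (Option Int × Option Int) :=
  if st.2.1.isSome then st.1 ++ [(st.2.1, st.2.2.1)] else st.1

def finishB (gs : List PVGroup) : List (Option Int × Option Int) :=
  gs.reverse.flatMap emitGroup

-- the simulation relation between A's scalar state and B's group stack
def PVRel : Bool → (List (Option Int × Option Int) × Option Int × Option Int × Nat) →
    List PVGroup → Prop
  | false, (counts, lvl, cnt, _), gs =>
      lvl = none ∧ cnt = none ∧ finishB gs = counts
  | true, (counts, lvl, cnt, shift), gs =>
      ∃ l cs rest, gs = .run l cs :: rest ∧ lvl = some l ∧ cnt = some (foldVal cs) ∧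
        cs ≠ [] ∧ shift = 6 * (cs.length - 1) ∧ finishB rest = counts

theorem expandOther_eq (x : Int) : expandOther x = checkMissedTicks x := rfl

theorem snd_payload_foldl (cs : List Int) (t : Int) (s : Nat) :
    (cs.foldl (fun (p : Int × Nat) (chunk : Int) => (PySem.Int.bor p.1 (chunk <<< p.2), p.2 + 6)) (t, s)).2
      = s + 6 * cs.length := by
  induction cs generalizing t s with
  | nil => simp
  | cons c cs ih => simp [List.foldl_cons, ih]; ring

theorem foldVal_singleton (c : Int) : foldVal [c] = c := by
  simp [foldVal, PySem.Int.bor_comm]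

theorem foldVal_append (cs : List Int) (c : Int) :
    foldVal (cs ++ [c]) = PySem.Int.bor (foldVal cs) (c <<< (6 * cs.length)) := by
  unfold foldVal
  rw [List.foldl_append]
  have h := snd_payload_foldl cs 0 0
  simp [List.foldl_cons]
  have h' : (List.foldl (fun (p : Int × Nat) (chunk : Int) => (PySem.Int.bor p.1 (chunk <<< p.2), p.2 + 6)) (0, 0) cs).2
      = 6 * cs.length := by simpa using h
  rw [show (List.foldl (fun (p : Int × Nat) (chunk : Int) => (PySem.Int.bor p.1 (chunk <<< p.2), p.2 + 6)) (0, 0) cs)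
        = ((List.foldl (fun (p : Int × Nat) (chunk : Int) => (PySem.Int.bor p.1 (chunk <<< p.2), p.2 + 6)) (0, 0) cs).1,
           6 * cs.length) from Prod.ext rfl h']

theorem finishB_cons (g : List PVGroup) (x : PVGroup) :
    finishB (x :: g) = finishB g ++ emitGroup x := by
  simp [finishB]

theorem rel_finish (o : Bool) (st : List (Option Int × Option Int) × Option Int × Option Int × Nat)
    (gs : List PVGroup) (h : PVRel o st gs) : finishA st = finishB gs := by
  obtain ⟨counts, lvl, cnt, shift⟩ := st
  cases o with
  | false =>
    obtain ⟨h1, h2, h3⟩ := h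
    simp [finishA, h1, h3]
  | true =>
    obtain ⟨l, cs, rest, hgs, h1, h2, _, _, h5⟩ := h
    subst hgs
    simp [finishA, h1, h2, finishB_cons, h5, emitGroup, foldVal]

theorem rel_step (items : List Int) (o : Bool)
    (st : List (Option Int × Option Int) × Option Int × Option Int × Nat)
    (gs : List PVGroup) (hok : okItems items o = true) (hrel : PVRel o st gs) :
    ∃ o', PVRel o' (items.foldl aStep st) (items.foldl bStep gs) := by
  induction items generalizing o st gs with
  | nil => exact ⟨o, hrel⟩
  | cons x xs ih =>
    obtain ⟨counts, lvl, cnt, shift⟩ := st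
    simp only [okItems] at hok
    simp only [List.foldl_cons]
    by_cases hrun : PySem.Int.band x 192 = 0 ∨ PySem.Int.band x 192 = 64
    · -- new low / new high byte: open a new run
      rw [if_pos hrun] at hok
      apply ih true _ _ hok
      have hlvl : (if PySem.Int.band x 192 = 0 then (0 : Int) else 1)
          = (if PySem.Int.band x 192 = 64 then (1 : Int) else 0) := by
        rcases hrun with h | h <;> simp [h]
      have hb : bStep gs x
          = .run (if PySem.Int.band x 192 = 64 then (1 : Int) else 0) [PySem.Int.band x 63] :: gs := by
        simp only [bStep]; rw [if_pos hrun, hlvl]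
      cases o with
      | false =>
        obtain ⟨h1, h2, h3⟩ := hrel
        subst h1; subst h2
        have ha : aStep (counts, none, none, shift) x
            = (counts, some (if PySem.Int.band x 192 = 64 then (1 : Int) else 0),
               some (PySem.Int.band x 63), 0) := by
          simp only [aStep]; rw [if_pos hrun]
        rw [ha, hb]
        exact ⟨_, [PySem.Int.band x 63], gs, rfl, rfl, by rw [foldVal_singleton],
          by simp, by simp, h3⟩
      | true =>
        obtain ⟨l, cs, rest, hgs, h1, h2, h4, h5, h6⟩ := hrel
        subst hgs; subst h1; subst h2
        have ha : aStep (counts, some l, some (foldVal cs), shift) x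
            = (counts ++ [(some l, some (foldVal cs))],
               some (if PySem.Int.band x 192 = 64 then (1 : Int) else 0),
               some (PySem.Int.band x 63), 0) := by
          simp only [aStep]; rw [if_pos hrun]
        rw [ha, hb]
        refine ⟨_, [PySem.Int.band x 63], PVGroup.run l cs :: rest, rfl, rfl,
          by rw [foldVal_singleton], by simp, by simp, ?_⟩
        simp [finishB_cons, h6, emitGroup, foldVal]
    · by_cases hagn : PySem.Int.band x 192 = 128
      · -- 'again' byte: extend the open run (Pre_ guarantees it is open)
        rw [if_neg hrun, if_pos hagn] at hok
        obtain ⟨ho, hok⟩ := Bool.and_eq_true_iff.mp hok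
        subst ho
        obtain ⟨l, cs, rest, hgs, h1, h2, h4, h5, h6⟩ := hrel
        subst hgs; subst h1; subst h2
        apply ih true _ _ hok
        have hlen : shift + 6 = 6 * cs.length := by
          rw [h5]
          have : cs.length ≠ 0 := by simpa using h4
          omega
        have ha : aStep (counts, some l, some (foldVal cs), shift) x
            = (counts, some l,
               some (PySem.Int.bor (foldVal cs) (PySem.Int.band x 63 <<< (6 * cs.length))),
               shift + 6) := by
          simp only [aStep]; rw [if_neg hrun, if_pos hagn]
          simp [hlen]
        have hb : bStep (PVGroup.run l cs :: rest) x
            = .run l (cs ++ [PySem.Int.band x 63]) :: rest := by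
          simp only [bStep]; rw [if_neg hrun, if_pos hagn]
        rw [ha, hb]
        refine ⟨l, cs ++ [PySem.Int.band x 63], rest, rfl, rfl,
          by rw [foldVal_append], by simp, ?_, h6⟩
        simp
        omega
      · -- tick / overrun byte: close any open run, stand-alone group
        rw [if_neg hrun, if_neg hagn] at hok
        apply ih false _ _ hok
        have ha : aStep (counts, lvl, cnt, shift) x
            = ((if lvl.isSome then counts ++ [(lvl, cnt)] else counts) ++ checkMissedTicks x,
               none, none, shift) := by
          simp only [aStep]; rw [if_neg hrun, if_neg hagn]
        have hb : bStep gs x = .other x :: gs := by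
          simp only [bStep]; rw [if_neg hrun, if_neg hagn]
        rw [ha, hb]
        cases o with
        | false =>
          obtain ⟨h1, h2, h3⟩ := hrel
          subst h1; subst h2
          exact ⟨rfl, rfl, by simp [finishB_cons, h3, emitGroup, expandOther_eq]⟩
        | true =>
          obtain ⟨l, cs, rest, hgs, h1, h2, h4, h5, h6⟩ := hrel
          subst hgs; subst h1; subst h2
          refine ⟨rfl, rfl, ?_⟩
          simp [finishB_cons, h6, emitGroup, expandOther_eq, foldVal]

-- ===== VERDICT (by name: the statement is the Claim_ definition above) =====
theorem processDigital_spec : Claim_equal_processDigital := by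
  intro d _ hpre
  obtain ⟨-, hok⟩ := hpre
  unfold Spec_processDigital processDigital processDigital_alt
  obtain ⟨o', hrel⟩ := rel_step (parseHexBuf d) false ([], none, none, 0) [] hok
    ⟨rfl, rfl, rfl⟩
  have := rel_finish o' _ _ hrel
  simpa [finishA, finishB] using this
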